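-- pv_equiv track=rewrite | github.com/pypi-data/pypi-mirror-401 | packages/pytilsx/pytilsx-1.0.0-py3-none-any.whl/pytilsx/list.py | sortbystrlen
-- ===== SOURCE A (Python) =====
-- def sortbystrlen(_list:list, revers:bool = False):
--     """Sorting a list item by its length from largest to smallest without inversion"""
--     if _list == []:
--         return []
--
--     outlist = _list.copy()
--     n = len(outlist)
--
--     for i in range(n):
--         for j in range(0, n - i - 1):
--             if (not revers and len(outlist[j]) > len(outlist[j + 1])) or (revers and len(outlist[j]) < len(outlist[j + 1])):
--                 outlist[j], outlist[j + 1] = outlist[j + 1], outlist[j]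
--
--     return outlist
-- ===== SOURCE B (Python) =====
-- def sortbystrlen(_list: list, revers: bool = False):
--     """Stable merge sort by string length (ascending; descending when revers)."""
--     def msort(xs):
--         if len(xs) < 2:
--             return list(xs)
--         mid = len(xs) // 2
--         left = msort(xs[:mid])
--         right = msort(xs[mid:])
--         out = []
--         i = 0
--         j = 0
--         while i < len(left) and j < len(right):
--             if (len(left[i]) < len(right[j])) if revers else (len(right[j]) < len(left[i])):
--                 out.append(right[j])
--                 j += 1
--             else:
--                 out.append(left[i])
--                 i += 1
--         out.extend(left[i:])
--         out.extend(right[j:])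
--         return out
--     return msort(_list)
-- ===== Notes on version B (the rewrite author's own statement) =====
-- stated objective: faster
-- what changed: Replaces A's O(n^2) adjacent-swap bubble sort with a stable top-down merge sort keyed on string length (ties take the left run, preserving A's stability).
import Mathlib
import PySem

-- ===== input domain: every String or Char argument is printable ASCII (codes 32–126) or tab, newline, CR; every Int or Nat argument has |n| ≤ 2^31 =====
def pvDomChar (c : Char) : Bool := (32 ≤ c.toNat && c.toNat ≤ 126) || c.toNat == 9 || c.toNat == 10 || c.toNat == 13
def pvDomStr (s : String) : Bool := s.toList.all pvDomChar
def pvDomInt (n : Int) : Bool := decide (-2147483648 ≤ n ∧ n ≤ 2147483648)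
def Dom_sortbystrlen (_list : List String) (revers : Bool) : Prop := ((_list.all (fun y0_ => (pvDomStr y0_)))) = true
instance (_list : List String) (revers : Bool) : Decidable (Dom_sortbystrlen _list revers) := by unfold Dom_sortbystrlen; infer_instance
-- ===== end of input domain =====

-- B replaces A's O(n^2) bubble sort by a stable top-down merge sort on string length; same output everywhere.

-- ===== PORT A =====
-- one step of A's inner loop: compare outlist[j] with outlist[j+1] and swap (tuple assignment)
def swapStep (revers : Bool) (xs : List String) (j : Nat) : List String :=
  match xs[j]?, xs[j + 1]? with
  | some a, some b =>
      if (!revers && decide (PySem.Str.len b < PySem.Str.len a)) ||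
         (revers && decide (PySem.Str.len a < PySem.Str.len b)) then
        (xs.set j b).set (j + 1) a
      else xs
  | _, _ => xs

def sortbystrlen (_list : List String) (revers : Bool) : List String :=
  if _list = [] then []
  else
    let n := _list.length
    (List.range n).foldl
      (fun outlist i =>
        (List.range (n - i - 1)).foldl (fun outlist j => swapStep revers outlist j) outlist)
      _list

-- ===== PORT B =====
-- Source B's index-based merge loop, ported as the equivalent structural recursion consuming the
-- two runs front-first (same comparisons in the same order; ties take the left run).
def mergeB (revers : Bool) : List String → List String → List String
  | [], r => r
  | l, [] => l
  | a :: l, b :: r =>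
      if (if revers then decide (PySem.Str.len a < PySem.Str.len b)
          else decide (PySem.Str.len b < PySem.Str.len a)) then
        b :: mergeB revers (a :: l) r
      else
        a :: mergeB revers l (b :: r)
  termination_by l r => l.length + r.length

-- xs[:mid] / xs[mid:] with 0 ≤ mid ≤ len are exactly take/drop; len(xs)//2 on a Nat is Nat division
def msortB (revers : Bool) (xs : List String) : List String :=
  if xs.length < 2 then xs
  else
    mergeB revers (msortB revers (xs.take (xs.length / 2))) (msortB revers (xs.drop (xs.length / 2)))
  termination_by xs.length
  decreasing_by
  · simp only [List.length_take]; omega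
  · simp only [List.length_drop]; omega

def sortbystrlen_alt (_list : List String) (revers : Bool) : List String :=
  msortB revers _list

-- ===== PRECONDITION & SPEC =====
def Spec_sortbystrlen (_list : List String) (revers : Bool) (out : List String) : Prop := out = sortbystrlen_alt _list revers
instance (_list : List String) (revers : Bool) (out : List String) : Decidable (Spec_sortbystrlen _list revers out) := by unfold Spec_sortbystrlen; infer_instance

-- ===== CLAIM (what is proved, stated in full; the proofs are below) =====
def Claim_equal_sortbystrlen : Prop := ∀ (_list : List String) (revers : Bool), Dom_sortbystrlen _list revers → Spec_sortbystrlen _list revers (sortbystrlen _list revers)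

-- ===== LEMMAS AND PROOFS =====

-- the signed length measure: ascending on length for revers = false, descending for revers = true
def mu (revers : Bool) (s : String) : Int :=
  if revers then -(PySem.Str.len s) else PySem.Str.len s

-- stable insertion of x: past every y with mu y < mu x (so x lands after equal measures)
def insM (revers : Bool) (x : String) : List String → List String
  | [] => [x]
  | y :: ys => if mu revers y < mu revers x then y :: insM revers x ys else x :: y :: ys

-- canonical stable sort used only as proof device: foldr insertion
def canon (revers : Bool) (z : List String) (xs : List String) : List String :=
  xs.foldr (insM revers) z

lemma swapCond_eq (revers : Bool) (a b : String) :
    ((!revers && decide (PySem.Str.len b < PySem.Str.len a)) ||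
     (revers && decide (PySem.Str.len a < PySem.Str.len b)))
      = decide (mu revers b < mu revers a) := by
  cases revers <;> simp [mu]

lemma insM_cons_lt (revers : Bool) (x y : String) (ys : List String)
    (h : mu revers y < mu revers x) :
    insM revers x (y :: ys) = y :: insM revers x ys := by simp [insM, h]

lemma insM_cons_ge (revers : Bool) (x y : String) (ys : List String)
    (h : ¬ mu revers y < mu revers x) :
    insM revers x (y :: ys) = x :: y :: ys := by simp [insM, h]

lemma insM_comm (revers : Bool) (a b : String) (h : mu revers a ≠ mu revers b) :
    ∀ z, insM revers a (insM revers b z) = insM revers b (insM revers a z) := by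
  intro z
  induction z with
  | nil =>
      simp only [insM]
      split_ifs <;> first | rfl | omega
  | cons y ys ih =>
      by_cases hyb : mu revers y < mu revers b <;> by_cases hya : mu revers y < mu revers a
      · rw [insM_cons_lt revers b y ys hyb, insM_cons_lt revers a y ys hya,
          insM_cons_lt revers a y _ hya, insM_cons_lt revers b y _ hyb, ih]
      · rw [insM_cons_lt revers b y ys hyb, insM_cons_ge revers a y _ hya,
          insM_cons_ge revers a y ys hya, insM_cons_lt revers b a _ (by omega),
          insM_cons_lt revers b y ys hyb]
      · rw [insM_cons_ge revers b y ys hyb, insM_cons_lt revers a y ys hya,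
          insM_cons_ge revers b y _ hyb, insM_cons_lt revers a b _ (by omega),
          insM_cons_lt revers a y ys hya]
      · rw [insM_cons_ge revers b y ys hyb, insM_cons_ge revers a y ys hya]
        by_cases hab : mu revers b < mu revers a
        · rw [insM_cons_lt revers a b _ hab, insM_cons_ge revers a y ys hya,
            insM_cons_ge revers b a _ (by omega)]
        · rw [insM_cons_ge revers a b _ hab, insM_cons_lt revers b a _ (by omega),
            insM_cons_ge revers b y ys hyb]

-- a sorted list is a fixed point of canon (with empty accumulator)
lemma canon_of_pairwise (revers : Bool) (xs : List String)
    (h : xs.Pairwise (fun a b => mu revers a ≤ mu revers b)) : canon revers [] xs = xs := by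
  induction xs with
  | nil => rfl
  | cons x t ih =>
      have ht := (List.pairwise_cons.mp h).2
      have hx := (List.pairwise_cons.mp h).1
      show insM revers x (canon revers [] t) = x :: t
      rw [ih ht]
      cases t with
      | nil => rfl
      | cons y t' =>
          have := hx y (by simp)
          simp [insM]; omega

-- move an element whose measure differs from everything before it to the front of the fold
lemma canon_middle (revers : Bool) (b : String) :
    ∀ (u v z : List String), (∀ x ∈ u, mu revers x ≠ mu revers b) →
      canon revers z (u ++ b :: v) = insM revers b (canon revers z (u ++ v)) := by
  intro u
  induction u with
  | nil => intro v z _; rfl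
  | cons x u' ih =>
      intro v z h
      show insM revers x (canon revers z (u' ++ b :: v))
        = insM revers b (insM revers x (canon revers z (u' ++ v)))
      rw [ih v z (fun y hy => h y (by simp [hy]))]
      exact insM_comm revers x b (h x (by simp)) _

-- ---------- A side: the inner loop is a bubble pass ----------

-- carry-based bubble pass (structural form of A's inner loop)
def bub (revers : Bool) (c : String) : List String → List String
  | [] => [c]
  | y :: t =>
      if mu revers y < mu revers c then y :: bub revers c t else c :: bub revers y t

def passB (revers : Bool) : List String → List String
  | [] => []
  | x :: t => bub revers x t

-- everything about one pass, in one induction: shape q ++ [m], length, membership,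
-- m is a maximum, and how the pass extends when one element is appended
lemma bub_spec (revers : Bool) :
    ∀ (t : List String) (c : String), ∃ q m, bub revers c t = q ++ [m] ∧
      q.length = t.length ∧ m ∈ c :: t ∧ (∀ x ∈ q, x ∈ c :: t) ∧
      (∀ x ∈ c :: t, mu revers x ≤ mu revers m) ∧
      (∀ w, bub revers c (t ++ [w]) =
        q ++ (if mu revers w < mu revers m then [w, m] else [m, w])) := by
  intro t
  induction t with
  | nil =>
      intro c
      refine ⟨[], c, rfl, rfl, by simp, by simp, by simp, fun w => ?_⟩
      simp [bub]
  | cons y t' ih =>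
      intro c
      by_cases h : mu revers y < mu revers c
      · obtain ⟨q, m, he, hl, hm, hq, hb, hs⟩ := ih c
        refine ⟨y :: q, m, by simp [bub, h, he], by simp [hl], ?_, ?_, ?_, fun w => ?_⟩
        · rcases List.mem_cons.mp hm with hm | hm <;> simp [hm]
        · intro x hx
          rcases List.mem_cons.mp hx with hx | hx
          · simp [hx]
          · rcases List.mem_cons.mp (hq x hx) with h' | h' <;> simp [h']
        · intro x hx
          rcases List.mem_cons.mp hx with hx | hx
          · exact hx ▸ hb c (by simp)
          · rcases List.mem_cons.mp hx with hx' | hx'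
            · subst hx'; have := hb c (by simp); omega
            · exact hb x (by simp [hx'])
        · simp only [List.cons_append, bub, if_pos h, hs w, List.cons_append]
      · obtain ⟨q, m, he, hl, hm, hq, hb, hs⟩ := ih y
        refine ⟨c :: q, m, by simp [bub, h, he], by simp [hl], ?_, ?_, ?_, fun w => ?_⟩
        · rcases List.mem_cons.mp hm with hm | hm <;> simp [hm]
        · intro x hx
          rcases List.mem_cons.mp hx with hx | hx
          · simp [hx]
          · rcases List.mem_cons.mp (hq x hx) with h' | h' <;> simp [h']
        · intro x hx
          rcases List.mem_cons.mp hx with hx | hx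
          · subst hx; have := hb y (by simp); omega
          · exact hb x hx
        · simp only [List.cons_append, bub, if_neg h, hs w, List.cons_append]

-- a pass does not change the canonical sort, for every accumulator
lemma bub_canon (revers : Bool) :
    ∀ (t : List String) (c : String) (z : List String),
      canon revers z (bub revers c t) = canon revers z (c :: t) := by
  intro t
  induction t with
  | nil => intro c z; rfl
  | cons y t' ih =>
      intro c z
      by_cases h : mu revers y < mu revers c
      · rw [show bub revers c (y :: t') = y :: bub revers c t' from by simp [bub, h]]
        show insM revers y (canon revers z (bub revers c t')) = _
        rw [ih c z]
        show insM revers y (insM revers c (canon revers z t')) = _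
        rw [insM_comm revers y c (by omega) _]
        rfl
      · rw [show bub revers c (y :: t') = c :: bub revers y t' from by simp [bub, h]]
        show insM revers c (canon revers z (bub revers y t')) = _
        rw [ih y z]
        rfl

lemma swapStep_cons (revers : Bool) (x : String) (rest : List String) (j : Nat) :
    swapStep revers (x :: rest) (j + 1) = x :: swapStep revers rest j := by
  simp only [swapStep, List.getElem?_cons_succ]
  cases h1 : rest[j]? <;> cases h2 : rest[j + 1]? <;> simp only [List.set_cons_succ] <;>
    split <;> rename_i hc <;> simp [hc]

lemma swapStep_decomp (revers : Bool) :
    ∀ (q : List String) (m w : String) (d : List String),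
      swapStep revers (q ++ m :: w :: d) q.length =
        q ++ (if mu revers w < mu revers m then w :: m :: d else m :: w :: d) := by
  intro q
  induction q with
  | nil =>
      intro m w d
      simp only [List.nil_append, List.length_nil, swapStep, List.getElem?_cons_zero,
        List.getElem?_cons_succ, swapCond_eq]
      by_cases h : mu revers w < mu revers m <;> simp [h, List.set]
  | cons x q' ih =>
      intro m w d
      simp only [List.cons_append, List.length_cons, swapStep_cons, ih]

-- the inner index loop equals a bubble pass on the first k+1 elements
lemma inner_eq_pass (revers : Bool) (xs : List String) :
    ∀ k, k + 1 ≤ xs.length →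
      (List.range k).foldl (fun o j => swapStep revers o j) xs
        = passB revers (xs.take (k + 1)) ++ xs.drop (k + 1) := by
  intro k
  induction k with
  | zero =>
      intro h
      cases xs with
      | nil => simp at h
      | cons x t => simp [passB, bub]
  | succ k ih =>
      intro h
      rw [List.range_succ, List.foldl_append, List.foldl_cons, List.foldl_nil,
        ih (by omega)]
      have hk1 : k + 1 < xs.length := by omega
      -- decompose the prefix pass
      obtain ⟨p, t, hpt⟩ : ∃ p t, xs.take (k + 1) = p :: t := by
        cases hx : xs.take (k + 1) with
        | nil =>
            exfalso
            rcases List.take_eq_nil_iff.mp hx with h' | h'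
            · omega
            · rw [h'] at hk1; simp at hk1
        | cons p t => exact ⟨p, t, rfl⟩
      obtain ⟨q, m, he, hl, _, _, _, hs⟩ := bub_spec revers t p
      have hql : q.length = k := by
        have := congrArg List.length hpt
        simp [List.length_take] at this
        omega
      have hdrop : xs.drop (k + 1) = xs[k + 1] :: xs.drop (k + 2) := by
        rw [List.drop_eq_getElem_cons hk1]
      have htake : xs.take (k + 2) = xs.take (k + 1) ++ [xs[k + 1]] := by
        rw [List.take_add_one, List.getElem?_eq_getElem hk1]; rfl
      calc swapStep revers (passB revers (xs.take (k + 1)) ++ xs.drop (k + 1)) (k + 1 - 1)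
          = swapStep revers (q ++ m :: xs[k + 1] :: xs.drop (k + 2)) q.length := by
            rw [hpt]; show swapStep revers (bub revers p t ++ _) _ = _
            rw [he, hdrop, hql]; simp
        _ = q ++ (if mu revers xs[k + 1] < mu revers m
              then xs[k + 1] :: m :: xs.drop (k + 2) else m :: xs[k + 1] :: xs.drop (k + 2)) :=
            swapStep_decomp revers q m _ _
        _ = passB revers (xs.take (k + 2)) ++ xs.drop (k + 2) := by
            rw [htake, hpt]
            show _ = bub revers p (t ++ [xs[k + 1]]) ++ _
            rw [hs xs[k + 1]]
            by_cases hc : mu revers xs[k + 1] < mu revers m <;> simp [hc]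

-- full outer-loop invariant
-- the state of A's outer loop after k iterations (proof-side name for A's double foldl)
def outerA (revers : Bool) (xs : List String) (k : Nat) : List String :=
  (List.range k).foldl
    (fun outlist i =>
      (List.range (xs.length - i - 1)).foldl (fun o j => swapStep revers o j) outlist) xs

lemma outerA_succ (revers : Bool) (xs : List String) (k : Nat) :
    outerA revers xs (k + 1)
      = (List.range (xs.length - k - 1)).foldl (fun o j => swapStep revers o j)
          (outerA revers xs k) := by
  rw [outerA, List.range_succ, List.foldl_append]
  rfl

lemma outer_inv (revers : Bool) (xs : List String) :
    ∀ k, k ≤ xs.length →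
      (outerA revers xs k).length = xs.length ∧
      (∀ z, canon revers z (outerA revers xs k) = canon revers z xs) ∧
      ((outerA revers xs k).drop (xs.length - k)).Pairwise
        (fun a b => mu revers a ≤ mu revers b) ∧
      (∀ x ∈ (outerA revers xs k).take (xs.length - k),
        ∀ y ∈ (outerA revers xs k).drop (xs.length - k), mu revers x ≤ mu revers y) := by
  intro k
  induction k with
  | zero =>
      intro _
      refine ⟨rfl, fun z => rfl, ?_, ?_⟩
      · show (xs.drop xs.length).Pairwise _
        simp
      · intro x _ y hy
        simp [outerA] at hy
  | succ i ih =>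
      intro h
      obtain ⟨hlen, hcan, hpw, hbd⟩ := ih (by omega)
      set L := outerA revers xs i with hL
      have hi : i < xs.length := by omega
      have hstep : outerA revers xs (i + 1)
          = passB revers (L.take (xs.length - i - 1 + 1)) ++ L.drop (xs.length - i - 1 + 1) := by
        rw [outerA_succ]
        exact inner_eq_pass revers L (xs.length - i - 1) (by omega)
      have hs1 : xs.length - i - 1 + 1 = xs.length - i := by omega
      rw [hs1] at hstep
      obtain ⟨p, t, hpt⟩ : ∃ p t, L.take (xs.length - i) = p :: t := by
        cases hx : L.take (xs.length - i) with
        | nil =>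
            exfalso
            rcases List.take_eq_nil_iff.mp hx with h' | h'
            · omega
            · rw [h'] at hlen; simp at hlen; omega
        | cons p t => exact ⟨p, t, rfl⟩
      have htl : t.length + 1 = xs.length - i := by
        have := congrArg List.length hpt
        simp [List.length_take] at this
        omega
      obtain ⟨q, m, he, hl, hm, hq, hb, _⟩ := bub_spec revers t p
      have hpass : passB revers (L.take (xs.length - i)) = q ++ [m] := by
        rw [hpt]; exact he
      have hql : q.length = xs.length - i - 1 := by omega
      have hdecomp : outerA revers xs (i + 1) = q ++ m :: L.drop (xs.length - i) := by
        rw [hstep, hpass]; simp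
      have hmemP : ∀ x ∈ p :: t, x ∈ L.take (xs.length - i) := by
        intro x hx; rw [hpt]; exact hx
      have hsub : xs.length - (i + 1) = q.length := by omega
      refine ⟨?_, ?_, ?_, ?_⟩
      · rw [hdecomp]
        simp only [List.length_append, List.length_cons, List.length_drop, hql]
        omega
      · intro z
        rw [hstep, hpt]
        show canon revers z (bub revers p t ++ L.drop (xs.length - i)) = _
        calc canon revers z (bub revers p t ++ L.drop (xs.length - i))
            = canon revers (canon revers z (L.drop (xs.length - i))) (bub revers p t) := by
              simp [canon, List.foldr_append]
          _ = canon revers (canon revers z (L.drop (xs.length - i))) (p :: t) :=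
              bub_canon revers t p _
          _ = canon revers z ((p :: t) ++ L.drop (xs.length - i)) := by
              simp [canon, List.foldr_append]
          _ = canon revers z L := by rw [← hpt, List.take_append_drop]
          _ = canon revers z xs := hcan z
      · rw [hdecomp, hsub, List.drop_left]
        refine List.pairwise_cons.mpr ⟨?_, hpw⟩
        intro y hy
        exact hbd m (hmemP m hm) y hy
      · rw [hdecomp, hsub, List.drop_left, List.take_left]
        intro x hx y hy
        have hxP : x ∈ L.take (xs.length - i) := hmemP x (hq x hx)
        rcases List.mem_cons.mp hy with hy | hy
        · subst hy
          exact hb x (hq x hx)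
        · exact hbd x hxP y hy

-- A computes the canonical stable sort
lemma portA_canon (revers : Bool) (xs : List String) :
    sortbystrlen xs revers = canon revers [] xs := by
  by_cases hne : xs = []
  · subst hne; rfl
  · have hA : sortbystrlen xs revers = outerA revers xs xs.length := by
      rw [sortbystrlen, if_neg hne]; rfl
    obtain ⟨_, hcan, hpw, _⟩ := outer_inv revers xs xs.length le_rfl
    rw [Nat.sub_self, List.drop_zero] at hpw
    rw [hA, ← canon_of_pairwise revers _ hpw, hcan []]

-- ---------- B side ----------

lemma mergeB_nil_left (revers : Bool) (r : List String) : mergeB revers [] r = r := by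
  rw [mergeB]

lemma mergeB_nil_right (revers : Bool) (l : List String) : mergeB revers l [] = l := by
  cases l with
  | nil => rw [mergeB]
  | cons a l' => rw [mergeB]; simp

lemma mergeB_cond_lt {revers : Bool} {a b : String}
    (hc : (if revers = true then decide (PySem.Str.len a < PySem.Str.len b)
           else decide (PySem.Str.len b < PySem.Str.len a)) = true) :
    mu revers b < mu revers a := by
  cases revers <;> simp [mu] at hc ⊢ <;> omega

lemma mergeB_cond_ge {revers : Bool} {a b : String}
    (hc : ¬ (if revers = true then decide (PySem.Str.len a < PySem.Str.len b)
             else decide (PySem.Str.len b < PySem.Str.len a)) = true) :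
    mu revers a ≤ mu revers b := by
  cases revers <;> simp [mu] at hc ⊢ <;> omega

lemma mergeB_eq_take_right {revers : Bool} {a b : String} (l r : List String)
    (hc : (if revers = true then decide (PySem.Str.len a < PySem.Str.len b)
           else decide (PySem.Str.len b < PySem.Str.len a)) = true) :
    mergeB revers (a :: l) (b :: r) = b :: mergeB revers (a :: l) r := by
  rw [mergeB, if_pos hc]

lemma mergeB_eq_take_left {revers : Bool} {a b : String} (l r : List String)
    (hc : ¬ (if revers = true then decide (PySem.Str.len a < PySem.Str.len b)
             else decide (PySem.Str.len b < PySem.Str.len a)) = true) :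
    mergeB revers (a :: l) (b :: r) = a :: mergeB revers l (b :: r) := by
  rw [mergeB, if_neg hc]

lemma mergeB_mem (revers : Bool) :
    ∀ (l r : List String), ∀ x ∈ mergeB revers l r, x ∈ l ∨ x ∈ r := by
  intro l r
  induction l, r using mergeB.induct revers with
  | case1 r => intro x hx; rw [mergeB_nil_left] at hx; exact Or.inr hx
  | case2 l _ => intro x hx; rw [mergeB_nil_right] at hx; exact Or.inl hx
  | case3 a l b r hc ih =>
      intro x hx
      rw [mergeB_eq_take_right l r hc] at hx
      rcases List.mem_cons.mp hx with hx | hx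
      · exact Or.inr (by simp [hx])
      · rcases ih x hx with h' | h'
        · exact Or.inl h'
        · exact Or.inr (by simp [h'])
  | case4 a l b r hc ih =>
      intro x hx
      rw [mergeB_eq_take_left l r hc] at hx
      rcases List.mem_cons.mp hx with hx | hx
      · exact Or.inl (by simp [hx])
      · rcases ih x hx with h' | h'
        · exact Or.inl (by simp [h'])
        · exact Or.inr h'

lemma mergeB_pairwise (revers : Bool) :
    ∀ (l r : List String),
      l.Pairwise (fun a b => mu revers a ≤ mu revers b) →
      r.Pairwise (fun a b => mu revers a ≤ mu revers b) →
      (mergeB revers l r).Pairwise (fun a b => mu revers a ≤ mu revers b) := by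
  intro l r
  induction l, r using mergeB.induct revers with
  | case1 r => intro _ hr; rw [mergeB_nil_left]; exact hr
  | case2 l _ => intro hl _; rw [mergeB_nil_right]; exact hl
  | case3 a l b r hc ih =>
      intro hl hr
      rw [mergeB_eq_take_right l r hc]
      refine List.pairwise_cons.mpr ⟨?_, ih hl (List.pairwise_cons.mp hr).2⟩
      intro y hy
      have hlt := mergeB_cond_lt hc
      rcases mergeB_mem revers (a :: l) r y hy with h' | h'
      · rcases List.mem_cons.mp h' with h' | h'
        · subst h'; omega
        · have := (List.pairwise_cons.mp hl).1 y h'; omega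
      · exact (List.pairwise_cons.mp hr).1 y h'
  | case4 a l b r hc ih =>
      intro hl hr
      rw [mergeB_eq_take_left l r hc]
      refine List.pairwise_cons.mpr ⟨?_, ih (List.pairwise_cons.mp hl).2 hr⟩
      intro y hy
      have hge := mergeB_cond_ge hc
      rcases mergeB_mem revers l (b :: r) y hy with h' | h'
      · exact (List.pairwise_cons.mp hl).1 y h'
      · rcases List.mem_cons.mp h' with h' | h'
        · subst h'; omega
        · have := (List.pairwise_cons.mp hr).1 y h'; omega

lemma canon_append (revers : Bool) (u v z : List String) :
    canon revers z (u ++ v) = canon revers (canon revers z v) u := by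
  simp [canon, List.foldr_append]

lemma mergeB_canon (revers : Bool) :
    ∀ (l r : List String), l.Pairwise (fun a b => mu revers a ≤ mu revers b) →
      ∀ z, canon revers z (mergeB revers l r) = canon revers z (l ++ r) := by
  intro l r
  induction l, r using mergeB.induct revers with
  | case1 r => intro _ z; rw [mergeB_nil_left]; rfl
  | case2 l _ => intro _ z; rw [mergeB_nil_right, List.append_nil]
  | case3 a l b r hc ih =>
      intro hl z
      rw [mergeB_eq_take_right l r hc]
      have hlt := mergeB_cond_lt hc
      have hne : ∀ x ∈ a :: l, mu revers x ≠ mu revers b := by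
        intro x hx
        rcases List.mem_cons.mp hx with hx | hx
        · subst hx; omega
        · have := (List.pairwise_cons.mp hl).1 x hx; omega
      show insM revers b (canon revers z (mergeB revers (a :: l) r)) = _
      rw [ih hl z, canon_middle revers b (a :: l) r z hne]
  | case4 a l b r hc ih =>
      intro hl z
      rw [mergeB_eq_take_left l r hc]
      show insM revers a (canon revers z (mergeB revers l (b :: r))) = _
      rw [ih (List.pairwise_cons.mp hl).2 z]
      rfl

lemma msortB_spec (revers : Bool) :
    ∀ (xs : List String),
      (msortB revers xs).Pairwise (fun a b => mu revers a ≤ mu revers b) ∧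
      (∀ z, canon revers z (msortB revers xs) = canon revers z xs) := by
  intro xs
  induction xs using msortB.induct with
  | case1 x h =>
      rw [msortB, if_pos h]
      refine ⟨?_, fun z => rfl⟩
      match x, h with
      | [], _ => exact List.Pairwise.nil
      | [a], _ => exact List.pairwise_singleton _ a
  | case2 x h ih1 ih2 =>
      rw [msortB, if_neg h]
      refine ⟨mergeB_pairwise revers _ _ ih1.1 ih2.1, fun z => ?_⟩
      rw [mergeB_canon revers _ _ ih1.1 z, canon_append, ih1.2, ih2.2, ← canon_append,
        List.take_append_drop]

lemma portB_canon (revers : Bool) (xs : List String) :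
    sortbystrlen_alt xs revers = canon revers [] xs := by
  obtain ⟨hpw, hcan⟩ := msortB_spec revers xs
  rw [sortbystrlen_alt, ← canon_of_pairwise revers _ hpw, hcan []]

-- ===== VERDICT (by name: the statement is the Claim_ definition above) =====
theorem sortbystrlen_spec : Claim_equal_sortbystrlen := by
  intro xs revers _
  show sortbystrlen xs revers = sortbystrlen_alt xs revers
  rw [portA_canon, portB_canon]
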